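-- pv_equiv track=rewrite | github.com/Rischh/epreuve_de_leau | eau06.py | other_letter
-- ===== SOURCE A (Python) =====
-- def other_letter(string):
--     new_quote = ""
--     i = True
--     for char in string:
--         if i:
--             new_quote += char.upper()
--         else:
--             new_quote += char.lower()
--         if char != ' ':
--             i = not i
--     return new_quote
-- ===== SOURCE B (Python) =====
-- def other_letter(string):
--     idx = 0
--     words = []
--     for word in string.split(' '):
--         buf = []
--         for ch in word:
--             buf.append(ch.upper() if idx % 2 == 0 else ch.lower())
--             idx += 1
--         words.append(''.join(buf))
--     return ' '.join(words)
-- ===== Notes on version B (the rewrite author's own statement) =====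
-- stated objective: alternative
-- what changed: B splits the string on the space separator so spaces are handled by split/join, and processes the letter stream of each word with a plain alternating integer index (parity test), replacing A's single scan with a boolean toggle that is conditionally flipped on non-space characters.
import Mathlib
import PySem

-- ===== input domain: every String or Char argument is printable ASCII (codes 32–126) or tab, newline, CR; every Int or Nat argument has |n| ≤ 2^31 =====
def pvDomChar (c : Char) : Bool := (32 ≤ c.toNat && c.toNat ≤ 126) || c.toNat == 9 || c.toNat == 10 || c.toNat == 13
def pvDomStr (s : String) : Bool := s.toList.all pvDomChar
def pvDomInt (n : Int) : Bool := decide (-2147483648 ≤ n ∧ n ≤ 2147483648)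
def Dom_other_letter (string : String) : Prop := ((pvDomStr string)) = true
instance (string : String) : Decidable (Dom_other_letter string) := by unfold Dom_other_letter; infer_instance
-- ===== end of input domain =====

-- B alternates case by an integer index over split(' ') words instead of A's conditional boolean toggle scan (objective: alternative decomposition, same cost).

-- ===== PORT A =====
def other_letter (string : String) : String :=
  let r := string.toList.foldl
    (fun (s : List Char × Bool) char =>
      let nq := if s.2 then s.1 ++ [PySem.Chars.upperChar char] else s.1 ++ [PySem.Chars.lowerChar char]
      let i := if char ≠ ' ' then !s.2 else s.2
      (nq, i))
    ([], true)
  String.mk r.1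

-- ===== PORT B =====
def other_letter_alt (string : String) : String :=
  let r := (PySem.Chars.splitOn string.toList [' ']).foldl
    (fun (s : List (List Char) × Int) word =>
      let p := word.foldl
        (fun (t : List Char × Int) ch =>
          (t.1 ++ [if PySem.Int.mod t.2 2 = 0 then PySem.Chars.upperChar ch else PySem.Chars.lowerChar ch],
           t.2 + 1))
        ([], s.2)
      (s.1 ++ [p.1], p.2))
    ([], (0 : Int))
  String.mk (PySem.Chars.join [' '] r.1)

-- ===== PRECONDITION & SPEC =====
def Spec_other_letter (string : String) (out : String) : Prop := out = other_letter_alt string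
instance (string : String) (out : String) : Decidable (Spec_other_letter string out) := by unfold Spec_other_letter; infer_instance

-- ===== CLAIM (what is proved, stated in full; the proofs are below) =====
def Claim_equal_other_letter : Prop := ∀ (string : String), Dom_other_letter string → Spec_other_letter string (other_letter string)

-- ===== LEMMAS AND PROOFS =====

-- A's scan as a structural recursion: boolean toggle, spaces emitted unchanged (upper/lower of ' ' is ' ')
def goA : List Char → Bool → List Char
  | [], _ => []
  | c :: cs, b =>
    (if b then PySem.Chars.upperChar c else PySem.Chars.lowerChar c) ::
      goA cs (if c ≠ ' ' then !b else b)

-- the common spec: alternating by an integer index that skips spaces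
def hSpec : List Char → Int → List Char
  | [], _ => []
  | c :: cs, n =>
    if c = ' ' then ' ' :: hSpec cs n
    else (if PySem.Int.mod n 2 = 0 then PySem.Chars.upperChar c else PySem.Chars.lowerChar c)
           :: hSpec cs (n + 1)

-- natural recursion for split on a single space
def splitSp : List Char → List (List Char)
  | [] => [[]]
  | c :: cs =>
    if c = ' ' then [] :: splitSp cs
    else
      match splitSp cs with
      | [] => [[c]]
      | w :: ws => (c :: w) :: ws

def procW : List Char → Int → List Char
  | [], _ => []
  | c :: cs, n =>
    (if PySem.Int.mod n 2 = 0 then PySem.Chars.upperChar c else PySem.Chars.lowerChar c)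
      :: procW cs (n + 1)

def procAll : List (List Char) → Int → List (List Char)
  | [], _ => []
  | w :: ws, n => procW w n :: procAll ws (n + w.length)

theorem splitSp_ne_nil (l : List Char) : splitSp l ≠ [] := by
  cases l with
  | nil => simp [splitSp]
  | cons c cs =>
    simp only [splitSp]
    split
    · simp
    · cases h : splitSp cs <;> simp

theorem go_eq_splitSp (fuel : Nat) (l cur : List Char) (acc : List (List Char))
    (hf : l.length ≤ fuel) :
    PySem.Chars.splitOn.go [' '] fuel l cur acc =
      acc.reverse ++ List.modifyHead (cur.reverse ++ ·) (splitSp l) := by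
  induction fuel generalizing l cur acc with
  | zero =>
    have : l = [] := by cases l <;> simp_all
    subst this
    simp [PySem.Chars.splitOn.go, splitSp]
  | succ fuel ih =>
    cases l with
    | nil => simp [PySem.Chars.splitOn.go, splitSp]
    | cons c rest =>
      simp only [PySem.Chars.splitOn.go]
      by_cases hc : c = ' '
      · subst hc
        simp only [List.isPrefixOf, BEq.rfl, Bool.true_and, List.isPrefixOf_nil_left, if_true]
        rw [show List.drop [' '].length (' ' :: rest) = rest from rfl]
        rw [ih rest [] (cur.reverse :: acc) (by simpa using Nat.le_of_succ_le_succ hf)]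
        simp only [splitSp, if_true]
        cases splitSp rest <;> simp
      · have hpre : [' '].isPrefixOf (c :: rest) = false := by
          simp [List.isPrefixOf]
          intro h; exact absurd h.symm hc
        rw [hpre]
        simp only [Bool.false_eq_true, if_false]
        rw [ih rest (c :: cur) acc (by simpa using Nat.le_of_succ_le_succ hf)]
        simp only [splitSp, hc, if_false]
        cases h : splitSp rest with
        | nil => exact absurd h (splitSp_ne_nil rest)
        | cons w ws => simp

theorem splitOn_space (l : List Char) :
    PySem.Chars.splitOn l [' '] = splitSp l := by
  unfold PySem.Chars.splitOn
  rw [go_eq_splitSp l.length.succ l [] [] (Nat.le_succ _)]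
  cases h : splitSp l with
  | nil => exact absurd h (splitSp_ne_nil l)
  | cons w ws => simp

-- A's fold accumulates goA
theorem foldA_eq (cs : List Char) : ∀ (acc : List Char) (b : Bool),
    (cs.foldl
      (fun (s : List Char × Bool) char =>
        let nq := if s.2 then s.1 ++ [PySem.Chars.upperChar char] else s.1 ++ [PySem.Chars.lowerChar char]
        let i := if char ≠ ' ' then !s.2 else s.2
        (nq, i))
      (acc, b)).1 = acc ++ goA cs b := by
  induction cs with
  | nil => intro acc b; simp [goA]
  | cons c cs ih =>
    intro acc b
    simp only [List.foldl_cons, goA]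
    rw [ih]
    by_cases hb : b = true <;> simp_all

-- B's inner fold computes procW and advances the index by the word length
theorem foldB_inner (w : List Char) : ∀ (acc : List Char) (n : Int),
    w.foldl
      (fun (t : List Char × Int) ch =>
        (t.1 ++ [if PySem.Int.mod t.2 2 = 0 then PySem.Chars.upperChar ch else PySem.Chars.lowerChar ch],
         t.2 + 1))
      (acc, n) = (acc ++ procW w n, n + w.length) := by
  induction w with
  | nil => intro acc n; simp [procW]
  | cons c cs ih =>
    intro acc n
    simp only [List.foldl_cons]
    rw [ih]
    simp only [procW, List.length_cons, Prod.mk.injEq]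
    refine ⟨by simp, by push_cast; ring⟩

-- B's outer fold accumulates procAll
theorem foldB_outer (ws : List (List Char)) : ∀ (acc : List (List Char)) (n : Int),
    (ws.foldl
      (fun (s : List (List Char) × Int) word =>
        let p := word.foldl
          (fun (t : List Char × Int) ch =>
            (t.1 ++ [if PySem.Int.mod t.2 2 = 0 then PySem.Chars.upperChar ch else PySem.Chars.lowerChar ch],
             t.2 + 1))
          ([], s.2)
        (s.1 ++ [p.1], p.2))
      (acc, n)).1 = acc ++ procAll ws n := by
  induction ws with
  | nil => intro acc n; simp [procAll]
  | cons w ws ih =>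
    intro acc n
    simp only [List.foldl_cons]
    rw [foldB_inner]
    rw [ih]
    simp [procAll]

theorem procAll_ne_nil (l : List Char) (n : Int) : procAll (splitSp l) n ≠ [] := by
  cases h : splitSp l with
  | nil => exact absurd h (splitSp_ne_nil l)
  | cons w ws => simp [procAll]

-- joining B's processed words gives the common spec
theorem join_cons_head (a : Char) (p : List Char) (t : List (List Char)) :
    PySem.Chars.join [' '] ((a :: p) :: t) = a :: PySem.Chars.join [' '] (p :: t) := by
  cases t with
  | nil => rw [PySem.Chars.join_singleton, PySem.Chars.join_singleton]
  | cons q r =>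
    rw [PySem.Chars.join_cons_cons, PySem.Chars.join_cons_cons]
    simp

-- joining B's processed words gives the common spec
theorem join_procAll (cs : List Char) : ∀ (n : Int),
    PySem.Chars.join [' '] (procAll (splitSp cs) n) = hSpec cs n := by
  induction cs with
  | nil =>
    intro n
    simp only [splitSp, procAll, procW]
    rw [PySem.Chars.join_singleton]
    simp [hSpec]
  | cons c cs ih =>
    intro n
    by_cases hc : c = ' '
    · subst hc
      simp only [splitSp, if_true, procAll, procW, hSpec, List.length_nil, Nat.cast_zero, add_zero]
      cases h : procAll (splitSp cs) n with
      | nil => exact absurd h (procAll_ne_nil cs n)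
      | cons p t =>
        rw [PySem.Chars.join_cons_cons]
        simp only [List.nil_append]
        have := ih n
        rw [h] at this
        simp [this]
    · simp only [splitSp, hc, if_false, hSpec]
      cases h : splitSp cs with
      | nil => exact absurd h (splitSp_ne_nil cs)
      | cons w ws =>
        simp only [procAll, procW, List.length_cons]
        rw [join_cons_head]
        have harith : n + ((w.length : Int) + 1) = n + 1 + w.length := by ring
        rw [show ((w.length + 1 : Nat) : Int) = (w.length : Int) + 1 by push_cast; ring, harith]
        have h2 : procW w (n + 1) :: procAll ws (n + 1 + w.length) = procAll (splitSp cs) (n + 1) := by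
          rw [h]; rfl
        rw [h2, ih (n + 1)]

-- boolean toggle = parity of the skipping index
theorem goA_eq_hSpec (cs : List Char) : ∀ (n : Int),
    goA cs (decide (PySem.Int.mod n 2 = 0)) = hSpec cs n := by
  induction cs with
  | nil => intro n; simp [goA, hSpec]
  | cons c cs ih =>
    intro n
    by_cases hc : c = ' '
    · subst hc
      simp only [goA, hSpec, if_true]
      have hup : PySem.Chars.upperChar ' ' = ' ' := by decide
      have hlo : PySem.Chars.lowerChar ' ' = ' ' := by decide
      rw [← ih n]
      by_cases hm : PySem.Int.mod n 2 = 0 <;> simp [hm, hup, hlo]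
    · simp only [goA, hSpec, hc, if_false, ne_eq, not_false_eq_true, if_true]
      have hmod : (!decide (PySem.Int.mod n 2 = 0)) = decide (PySem.Int.mod (n + 1) 2 = 0) := by
        rw [PySem.Int.mod_eq_emod_of_pos (by norm_num), PySem.Int.mod_eq_emod_of_pos (by norm_num)]
        by_cases hm : n % 2 = 0
        · have : (n + 1) % 2 = 1 := by omega
          simp [hm, this]
        · have h1 : n % 2 = 1 := by omega
          have : (n + 1) % 2 = 0 := by omega
          simp [h1, this]
      rw [hmod, ih (n + 1)]
      by_cases hm : PySem.Int.mod n 2 = 0 <;> simp [hm]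

-- ===== VERDICT (by name: the statement is the Claim_ definition above) =====
theorem other_letter_spec : Claim_equal_other_letter := by
  intro s _
  unfold Spec_other_letter other_letter other_letter_alt
  simp only []
  rw [foldA_eq, foldB_outer, splitOn_space]
  simp only [List.nil_append]
  rw [join_procAll]
  rw [← goA_eq_hSpec s.toList 0, show (decide (PySem.Int.mod 0 2 = 0)) = true from by decide]
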